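-- pv_equiv track=rewrite | github.com/choibigo/Study | 알고리즘 문제풀이/프로그래머스 2단계/멀리뛰기.py | solution
-- ===== SOURCE A (Python) =====
-- def solution(n):
--
--     # 1 2 3 4 5 6 7 8 9 10
--     # 1 2 3 5
--
--     if n<=3:
--         return n
--
--     dp = [0] *(n+1)
--
--     dp[1] = 1
--     dp[2] = 2
--     dp[3] = 3
--
--     for i in range(4, n+1):
--         dp[i] = (dp[i-1] + dp[i-2]) % 1234567
--
--     return dp[-1]
-- ===== SOURCE B (Python) =====
-- def solution(n):
--     if n <= 3:
--         return n
--     MOD = 1234567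
--     def fib(k):
--         # fast doubling: returns (F(k) % MOD, F(k+1) % MOD)
--         if k == 0:
--             return (0, 1)
--         a, b = fib(k // 2)
--         c = a * (2 * b - a) % MOD
--         d = (a * a + b * b) % MOD
--         if k % 2:
--             return (d, (c + d) % MOD)
--         return (c, d)
--     return fib(n + 1)[0]
-- ===== Notes on version B (the rewrite author's own statement) =====
-- stated objective: faster
-- what changed: Replaced the O(n) DP-array loop with fast-doubling Fibonacci recursion mod 1234567 (dp[n] = F(n+1) mod 1234567), computing the result in O(log n) multiplications with O(log n) space instead of an O(n) array.
import Mathlib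
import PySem

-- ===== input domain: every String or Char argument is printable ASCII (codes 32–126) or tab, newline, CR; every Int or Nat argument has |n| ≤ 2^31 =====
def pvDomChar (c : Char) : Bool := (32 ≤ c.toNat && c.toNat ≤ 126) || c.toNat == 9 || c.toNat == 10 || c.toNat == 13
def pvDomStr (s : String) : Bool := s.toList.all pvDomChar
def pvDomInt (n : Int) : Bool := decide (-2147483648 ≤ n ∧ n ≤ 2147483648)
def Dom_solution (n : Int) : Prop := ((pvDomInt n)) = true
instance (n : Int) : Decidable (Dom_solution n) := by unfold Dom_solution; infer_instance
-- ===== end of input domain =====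

-- B replaces A's O(n) dp-array loop by fast-doubling Fibonacci recursion mod 1234567 (O(log n)).

-- ===== PORT A =====
-- dp is a Python list (a dynamic array): ported as Lean Array. All indices A uses are
-- nonnegative and in range for n >= 4, so '.toNat' and 'setIfInBounds'/'getD' are exact here;
-- dp[-1] is the last element of the (nonempty) dp, i.e. index size-1.
def solution (n : Int) : Int :=
  if n ≤ 3 then n
  else
    -- dp = [0] * (n+1); dp[1] = 1; dp[2] = 2; dp[3] = 3
    let dp0 : Array Int := Array.replicate (n + 1).toNat 0
    let dp1 := dp0.setIfInBounds 1 1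
    let dp2 := dp1.setIfInBounds 2 2
    let dp3 := dp2.setIfInBounds 3 3
    -- for i in range(4, n+1): dp[i] = (dp[i-1] + dp[i-2]) % 1234567
    let dpF := (PySem.List.pyRange 4 (n + 1) 1).foldl
      (fun dp i =>
        dp.setIfInBounds i.toNat
          (PySem.Int.mod (dp.getD (i - 1).toNat 0 + dp.getD (i - 2).toNat 0) 1234567))
      dp3
    -- return dp[-1]
    dpF.getD (dpF.size - 1) 0

-- ===== PORT B =====
-- fast doubling: fib k = (F(k) % 1234567, F(k+1) % 1234567); recursion on k // 2
def fibFD (k : Nat) : Int × Int :=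
  if h : k = 0 then (0, 1)
  else
    let p := fibFD (k / 2)
    let a := p.1
    let b := p.2
    let c := PySem.Int.mod (a * (2 * b - a)) 1234567
    let d := PySem.Int.mod (a * a + b * b) 1234567
    if k % 2 = 1 then (d, PySem.Int.mod (c + d) 1234567) else (c, d)
decreasing_by exact Nat.div_lt_self (Nat.pos_of_ne_zero h) (by omega)

def solution_alt (n : Int) : Int :=
  if n ≤ 3 then n
  else (fibFD (n + 1).toNat).1   -- n ≥ 4 here, so (n+1).toNat is exactly Python's n+1

-- ===== PRECONDITION & SPEC =====
def Spec_solution (n : Int) (out : Int) : Prop := out = solution_alt n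
instance (n : Int) (out : Int) : Decidable (Spec_solution n out) := by unfold Spec_solution; infer_instance

-- ===== CLAIM (what is proved, stated in full; the proofs are below) =====
def Claim_equal_solution : Prop := ∀ (n : Int), Dom_solution n → Spec_solution n (solution n)

-- ===== LEMMAS AND PROOFS =====

theorem emod_self_modEq (x m : Int) : Int.ModEq m (x % m) x :=
  Int.emod_emod_of_dvd x dvd_rfl

theorem fib_two_mul_int (j : Nat) :
    (Nat.fib (2 * j) : Int) = (Nat.fib j : Int) * (2 * (Nat.fib (j + 1) : Int) - (Nat.fib j : Int)) := by
  have hle : Nat.fib j ≤ 2 * Nat.fib (j + 1) :=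
    le_trans (Nat.fib_le_fib_succ) (by omega)
  rw [Nat.fib_two_mul]
  push_cast [hle]
  ring

theorem fib_two_mul_add_one_int (j : Nat) :
    (Nat.fib (2 * j + 1) : Int) =
      (Nat.fib j : Int) * (Nat.fib j : Int) + (Nat.fib (j + 1) : Int) * (Nat.fib (j + 1) : Int) := by
  rw [Nat.fib_two_mul_add_one]
  push_cast
  ring

theorem fibFD_eq (k : Nat) :
    fibFD k = ((Nat.fib k : Int) % 1234567, (Nat.fib (k + 1) : Int) % 1234567) := by
  induction k using Nat.strong_induction_on with
  | _ k ih =>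
    by_cases h0 : k = 0
    · subst h0; simp [fibFD]
    · rw [fibFD, dif_neg h0]
      set m : Int := 1234567 with hm
      set j := k / 2 with hj
      have hjk : j < k := Nat.div_lt_self (Nat.pos_of_ne_zero h0) (by omega)
      rw [ih j hjk]
      set F0 : Int := (Nat.fib j : Int) with hF0
      set F1 : Int := (Nat.fib (j + 1) : Int) with hF1
      have ha : Int.ModEq m (F0 % m) F0 := emod_self_modEq F0 m
      have hb : Int.ModEq m (F1 % m) F1 := emod_self_modEq F1 m
      have hc : (F0 % m) * (2 * (F1 % m) - F0 % m) % m = (Nat.fib (2 * j) : Int) % m := by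
        rw [fib_two_mul_int j]
        exact Int.ModEq.mul ha ((Int.ModEq.mul_left 2 hb).sub ha)
      have hd : ((F0 % m) * (F0 % m) + (F1 % m) * (F1 % m)) % m
          = (Nat.fib (2 * j + 1) : Int) % m := by
        rw [fib_two_mul_add_one_int j]
        exact Int.ModEq.add (Int.ModEq.mul ha ha) (Int.ModEq.mul hb hb)
      have hsum : (Nat.fib (2 * j) : Int) + (Nat.fib (2 * j + 1) : Int)
          = (Nat.fib (2 * j + 2) : Int) := by
        have := Nat.fib_add_two (n := 2 * j)
        push_cast [this]; ring
      have hcd : ((F0 % m) * (2 * (F1 % m) - F0 % m) % m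
            + ((F0 % m) * (F0 % m) + (F1 % m) * (F1 % m)) % m) % m
          = (Nat.fib (2 * j + 2) : Int) % m := by
        have e1 : Int.ModEq m ((F0 % m) * (2 * (F1 % m) - F0 % m) % m)
            (Nat.fib (2 * j) : Int) := by rw [hc]; exact emod_self_modEq _ m
        have e2 : Int.ModEq m (((F0 % m) * (F0 % m) + (F1 % m) * (F1 % m)) % m)
            (Nat.fib (2 * j + 1) : Int) := by rw [hd]; exact emod_self_modEq _ m
        have := Int.ModEq.add e1 e2
        rw [hsum] at this
        exact this
      simp only [PySem.Int.mod_eq_emod_of_pos (show (0:Int) < m by norm_num)]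
      by_cases hpar : k % 2 = 1
      · have hk : k = 2 * j + 1 := by omega
        rw [if_pos hpar]
        refine Prod.ext ?_ ?_
        · show ((F0 % m) * (F0 % m) + (F1 % m) * (F1 % m)) % m = (Nat.fib k : Int) % m
          rw [hd, hk]
        · show ((F0 % m) * (2 * (F1 % m) - F0 % m) % m
              + ((F0 % m) * (F0 % m) + (F1 % m) * (F1 % m)) % m) % m
            = (Nat.fib (k + 1) : Int) % m
          rw [hcd, hk]
      · have hk : k = 2 * j := by omega
        rw [if_neg hpar]
        refine Prod.ext ?_ ?_
        · show (F0 % m) * (2 * (F1 % m) - F0 % m) % m = (Nat.fib k : Int) % m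
          rw [hc, hk]
        · show ((F0 % m) * (F0 % m) + (F1 % m) * (F1 % m)) % m = (Nat.fib (k + 1) : Int) % m
          rw [hd, hk]

-- proof-side names for A's loop body and initial dp (definitionally equal to what `solution` contains)
def pvStep (dp : Array Int) (i : Int) : Array Int :=
  dp.setIfInBounds i.toNat
    (PySem.Int.mod (dp.getD (i - 1).toNat 0 + dp.getD (i - 2).toNat 0) 1234567)

def pvInit (N : Nat) : Array Int :=
  (((Array.replicate (N + 1) (0 : Int)).setIfInBounds 1 1).setIfInBounds 2 2).setIfInBounds 3 3

-- dp[j] after the loop has processed indices up to t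
def fA (j : Nat) : Int := if j ≤ 3 then (j : Int) else (Nat.fib (j + 1) : Int) % 1234567

theorem fA_modEq (j : Nat) (hj : 1 ≤ j) :
    Int.ModEq 1234567 (fA j) ((Nat.fib (j + 1) : Int)) := by
  unfold fA
  split_ifs with h
  · interval_cases j <;> decide
  · exact emod_self_modEq _ _

theorem pvInit_size (N : Nat) : (pvInit N).size = N + 1 := by
  simp [pvInit]

theorem pvInit_getD (N : Nat) (hN : 4 ≤ N) (j : Nat) (hj : j ≤ N) :
    (pvInit N).getD j 0 = if 1 ≤ j ∧ j ≤ 3 then fA j else 0 := by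
  rw [Array.getD_eq_getD_getElem?]
  unfold pvInit
  simp only [Array.getElem?_setIfInBounds, Array.size_setIfInBounds, Array.size_replicate,
    Array.getElem?_replicate]
  have hjlt : j < N + 1 := by omega
  by_cases h3 : j = 3
  · subst h3; simp [fA, show 3 < N + 1 by omega]
  · by_cases h2 : j = 2
    · subst h2; simp [fA, show 2 < N + 1 by omega]
    · by_cases h1 : j = 1
      · subst h1; simp [fA, show 1 < N + 1 by omega]
      · rw [if_neg (fun h => h3 h.symm), if_neg (fun h => h2 h.symm),
            if_neg (fun h => h1 h.symm), if_neg (by omega : ¬ (1 ≤ j ∧ j ≤ 3))]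
        simp [hjlt]

theorem loopA_inv (N : Nat) (hN : 4 ≤ N) (t : Nat) (h3 : 3 ≤ t) (ht : t ≤ N) :
    ((PySem.List.pyRange 4 ((t : Int) + 1) 1).foldl pvStep (pvInit N)).size = N + 1 ∧
    ∀ j : Nat, j ≤ N →
      ((PySem.List.pyRange 4 ((t : Int) + 1) 1).foldl pvStep (pvInit N)).getD j 0
        = if 1 ≤ j ∧ j ≤ t then fA j else 0 := by
  induction t, h3 using Nat.le_induction with
  | base =>
    rw [show ((3 : Nat) : Int) + 1 = 4 by norm_num,
        PySem.List.pyRange_one_eq_nil (le_refl 4)]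
    exact ⟨pvInit_size N, fun j hj => pvInit_getD N hN j hj⟩
  | succ t h3 ih =>
    obtain ⟨ihlen, ihget⟩ := ih (by omega)
    have hrange : PySem.List.pyRange 4 (((t + 1 : Nat) : Int) + 1) 1
        = PySem.List.pyRange 4 ((t : Int) + 1) 1 ++ [(t : Int) + 1] := by
      push_cast
      rw [show ((t : Int) + 1 + 1) = (((t : Int) + 1) + 1) by ring]
      exact PySem.List.pyRange_one_succ_right (by omega)
    rw [hrange, List.foldl_append]
    set res := (PySem.List.pyRange 4 ((t : Int) + 1) 1).foldl pvStep (pvInit N) with hres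
    have hi1 : ((t : Int) + 1 - 1).toNat = t := by omega
    have hi2 : ((t : Int) + 1 - 2).toNat = t - 1 := by omega
    have hg1 : res.getD ((t : Int) + 1 - 1).toNat 0 = fA t := by
      rw [hi1, ihget t (by omega)]
      simp [show 1 ≤ t ∧ t ≤ t by omega]
    have hg2 : res.getD ((t : Int) + 1 - 2).toNat 0 = fA (t - 1) := by
      rw [hi2, ihget (t - 1) (by omega)]
      simp [show 1 ≤ t - 1 ∧ t - 1 ≤ t by omega]
    have hv : PySem.Int.mod (res.getD ((t : Int) + 1 - 1).toNat 0
          + res.getD ((t : Int) + 1 - 2).toNat 0) 1234567 = fA (t + 1) := by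
      rw [hg1, hg2, PySem.Int.mod_eq_emod_of_pos (by norm_num)]
      have e1 : Int.ModEq 1234567 (fA t) ((Nat.fib (t + 1) : Int)) := fA_modEq t (by omega)
      have e2 : Int.ModEq 1234567 (fA (t - 1)) ((Nat.fib t : Int)) := by
        have := fA_modEq (t - 1) (by omega)
        rwa [show t - 1 + 1 = t by omega] at this
      have hsum : (Nat.fib (t + 1) : Int) + (Nat.fib t : Int) = (Nat.fib (t + 2) : Int) := by
        have := Nat.fib_add_two (n := t)
        push_cast [this]; ring
      have := Int.ModEq.add e1 e2
      rw [hsum] at this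
      unfold fA
      rw [if_neg (by omega : ¬ t + 1 ≤ 3)]
      exact this
    rw [show List.foldl pvStep res [(t : Int) + 1] = pvStep res ((t : Int) + 1) from rfl]
    rw [show pvStep res ((t : Int) + 1) = res.setIfInBounds ((t : Int) + 1).toNat
        (PySem.Int.mod (res.getD ((t : Int) + 1 - 1).toNat 0
          + res.getD ((t : Int) + 1 - 2).toNat 0) 1234567) from rfl]
    rw [hv]
    have hcast : ((t : Int) + 1).toNat = t + 1 := by omega
    rw [hcast]
    refine ⟨by simp [Array.size_setIfInBounds, ihlen], fun j hj => ?_⟩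
    rw [Array.getD_eq_getD_getElem?, Array.getElem?_setIfInBounds]
    by_cases hjt : j = t + 1
    · subst hjt
      simp [ihlen, show t + 1 < N + 1 by omega]
    · rw [if_neg (fun h => hjt h.symm), ← Array.getD_eq_getD_getElem?, ihget j hj]
      have : (1 ≤ j ∧ j ≤ t) ↔ (1 ≤ j ∧ j ≤ t + 1) := by omega
      rw [if_congr this rfl rfl]

theorem solution_eq_fib (n : Int) (hn : 4 ≤ n) :
    solution n = (Nat.fib (n.toNat + 1) : Int) % 1234567 := by
  set N := n.toNat with hN
  have hNn : (N : Int) = n := by omega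
  have hN4 : 4 ≤ N := by omega
  unfold solution
  rw [if_neg (by omega : ¬ n ≤ 3), ← hNn]
  have htn : ((N : Int) + 1).toNat = N + 1 := by omega
  rw [htn]
  show (let dpF := (PySem.List.pyRange 4 ((N : Int) + 1) 1).foldl pvStep (pvInit N)
        dpF.getD (dpF.size - 1) 0)
    = (Nat.fib (N + 1) : Int) % 1234567
  obtain ⟨hlen, hget⟩ := loopA_inv N hN4 N (by omega) (le_refl N)
  set res := (PySem.List.pyRange 4 ((N : Int) + 1) 1).foldl pvStep (pvInit N) with hres
  show res.getD (res.size - 1) 0 = (Nat.fib (N + 1) : Int) % 1234567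
  have hidx : res.size - 1 = N := by omega
  rw [hidx, hget N (le_refl N), if_pos (by omega : 1 ≤ N ∧ N ≤ N)]
  unfold fA
  rw [if_neg (by omega : ¬ N ≤ 3)]

-- ===== VERDICT (by name: the statement is the Claim_ definition above) =====
theorem solution_spec : Claim_equal_solution := by
  intro n _
  unfold Spec_solution solution_alt
  by_cases h : n ≤ 3
  · unfold solution; simp [h]
  · have hn : 4 ≤ n := by omega
    rw [solution_eq_fib n hn, if_neg h, fibFD_eq]
    have : (n + 1).toNat = n.toNat + 1 := by omega
    rw [this]
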